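-- pv_equiv track=rewrite | github.com/Amine0385/A-Maze-ing | display.py | create_solve_cor
-- ===== SOURCE A (Python) =====
-- def create_solve_cor(entry, str):
--     x, y = entry
--     mylist = []
--     for i in str:
--         if i == 'S':
--             y += 1
--             mylist.append((y, x))
--         if i == 'N':
--             y -= 1
--             mylist.append((y, x))
--         if i == 'W':
--             x -= 1
--             mylist.append((y, x))
--         if i == 'E':
--             x += 1
--             mylist.append((y, x))
--     return mylist
-- ===== SOURCE B (Python) =====
-- def create_solve_cor(entry, str):
--     # Divide and conquer: the trajectory of a segment, relative to its start,
--     # is the left half's relative trajectory followed by the right half's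
--     # shifted by the left half's net displacement (obtained from char counts).
--     x0, y0 = entry
--
--     def traj(s):
--         # relative offsets (dy, dx) after each move character of s
--         if len(s) <= 1:
--             if s == 'S':
--                 return [(1, 0)]
--             if s == 'N':
--                 return [(-1, 0)]
--             if s == 'W':
--                 return [(0, -1)]
--             if s == 'E':
--                 return [(0, 1)]
--             return []
--         m = len(s) // 2
--         left = s[:m]
--         dy = left.count('S') - left.count('N')
--         dx = left.count('E') - left.count('W')
--         return traj(left) + [(dy + a, dx + b) for (a, b) in traj(s[m:])]
--
--     return [(y0 + a, x0 + b) for (a, b) in traj(str)]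
-- ===== Notes on version B (the rewrite author's own statement) =====
-- stated objective: alternative
-- what changed: A walks the string once, mutating (x,y) and appending after each direction character; B is a divide-and-conquer: it recursively computes each half's trajectory relative to its own start, derives the left half's net displacement from character counts, and shifts the right half's trajectory by it before concatenating.
import Mathlib
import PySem

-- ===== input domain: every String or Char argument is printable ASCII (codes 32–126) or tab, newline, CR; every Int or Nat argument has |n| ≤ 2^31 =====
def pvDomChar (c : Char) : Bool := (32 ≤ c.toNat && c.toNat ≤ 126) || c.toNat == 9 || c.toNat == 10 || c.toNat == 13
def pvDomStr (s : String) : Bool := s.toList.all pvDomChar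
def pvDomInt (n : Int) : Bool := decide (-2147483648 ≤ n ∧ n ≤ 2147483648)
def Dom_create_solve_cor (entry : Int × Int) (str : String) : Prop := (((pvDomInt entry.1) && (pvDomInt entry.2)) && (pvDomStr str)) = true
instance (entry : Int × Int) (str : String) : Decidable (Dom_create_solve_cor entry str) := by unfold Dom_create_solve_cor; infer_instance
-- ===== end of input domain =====

-- B replaces A's single mutating left-to-right loop by a divide-and-conquer that computes each
-- half's relative trajectory and shifts the right half by the left half's count-derived net
-- displacement; objective: alternative decomposition.

-- ===== PORT A =====
-- A's loop: state (x, y, mylist); the four ifs applied in sequence, as in the Python.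
def pvALoop : List Char → Int → Int → List (Int × Int) → List (Int × Int)
  | [], _, _, acc => acc
  | c :: cs, x, y, acc =>
    let s1 : Int × Int × List (Int × Int) :=
      if c = 'S' then (x, y + 1, acc ++ [(y + 1, x)]) else (x, y, acc)
    let s2 : Int × Int × List (Int × Int) :=
      if c = 'N' then (s1.1, s1.2.1 - 1, s1.2.2 ++ [(s1.2.1 - 1, s1.1)]) else s1
    let s3 : Int × Int × List (Int × Int) :=
      if c = 'W' then (s2.1 - 1, s2.2.1, s2.2.2 ++ [(s2.2.1, s2.1 - 1)]) else s2
    let s4 : Int × Int × List (Int × Int) :=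
      if c = 'E' then (s3.1 + 1, s3.2.1, s3.2.2 ++ [(s3.2.1, s3.1 + 1)]) else s3
    pvALoop cs s4.1 s4.2.1 s4.2.2

def create_solve_cor (entry : Int × Int) (str : String) : List (Int × Int) :=
  pvALoop str.toList entry.1 entry.2 []

-- ===== PORT B =====
-- traj s: the (dy, dx) offsets relative to the segment's start, one per move character, by
-- divide and conquer exactly as Source B's inner function.
def pvTraj (cs : List Char) : List (Int × Int) :=
  if h : cs.length ≤ 1 then
    if cs = ['S'] then [(1, 0)]
    else if cs = ['N'] then [(-1, 0)]
    else if cs = ['W'] then [(0, -1)]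
    else if cs = ['E'] then [(0, 1)]
    else []
  else
    let m := cs.length / 2
    let left := cs.take m
    let dy : Int := (left.count 'S' : Int) - (left.count 'N' : Int)
    let dx : Int := (left.count 'E' : Int) - (left.count 'W' : Int)
    pvTraj left ++ (pvTraj (cs.drop m)).map (fun p => (dy + p.1, dx + p.2))
termination_by cs.length
decreasing_by
  · simp only [List.length_take]; omega
  · simp only [List.length_drop]; omega

def create_solve_cor_alt (entry : Int × Int) (str : String) : List (Int × Int) :=
  (pvTraj str.toList).map (fun p => (entry.2 + p.1, entry.1 + p.2))

-- ===== PRECONDITION & SPEC =====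
def Spec_create_solve_cor (entry : Int × Int) (str : String) (out : List (Int × Int)) : Prop := out = create_solve_cor_alt entry str
instance (entry : Int × Int) (str : String) (out : List (Int × Int)) : Decidable (Spec_create_solve_cor entry str out) := by unfold Spec_create_solve_cor; infer_instance

-- ===== CLAIM (what is proved, stated in full; the proofs are below) =====
def Claim_equal_create_solve_cor : Prop := ∀ (entry : Int × Int) (str : String), Dom_create_solve_cor entry str → Spec_create_solve_cor entry str (create_solve_cor entry str)

-- ===== LEMMAS AND PROOFS =====
-- reference semantics: the delta of one character and the prefix-sum scan
def pvDelta (c : Char) : Option (Int × Int) :=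
  if c = 'S' then some (1, 0)
  else if c = 'N' then some (-1, 0)
  else if c = 'W' then some (0, -1)
  else if c = 'E' then some (0, 1)
  else none

def pvScan : Int × Int → List (Int × Int) → List (Int × Int)
  | _, [] => []
  | p, d :: ds =>
    let q := (p.1 + d.1, p.2 + d.2)
    q :: pvScan q ds

theorem pvALoop_eq_scan (cs : List Char) : ∀ (x y : Int) (acc : List (Int × Int)),
    pvALoop cs x y acc = acc ++ pvScan (y, x) (cs.filterMap pvDelta) := by
  induction cs with
  | nil => intro x y acc; simp [pvALoop, pvScan]
  | cons c cs ih =>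
    intro x y acc
    by_cases hS : c = 'S'
    · subst hS; simp [pvALoop, pvDelta, pvScan, ih]
    · by_cases hN : c = 'N'
      · subst hN; simp [pvALoop, pvDelta, pvScan, ih, sub_eq_add_neg]
      · by_cases hW : c = 'W'
        · subst hW; simp [pvALoop, pvDelta, pvScan, ih, sub_eq_add_neg]
        · by_cases hE : c = 'E'
          · subst hE; simp [pvALoop, pvDelta, pvScan, ih]
          · simp [pvALoop, pvDelta, hS, hN, hW, hE, ih]

theorem pvScan_shift (ds : List (Int × Int)) : ∀ (p q : Int × Int),
    pvScan (q.1 + p.1, q.2 + p.2) ds = (pvScan p ds).map (fun r => (q.1 + r.1, q.2 + r.2)) := by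
  induction ds with
  | nil => intro p q; simp [pvScan]
  | cons d ds ih =>
    intro p q
    simp only [pvScan, List.map_cons]
    have h1 : (q.1 + p.1 + d.1, q.2 + p.2 + d.2) = (q.1 + (p.1 + d.1), q.2 + (p.2 + d.2)) := by
      rw [Prod.mk.injEq]; constructor <;> ring
    rw [h1, ih (p.1 + d.1, p.2 + d.2) q]

-- the componentwise sum of a delta list
def pvSum (ds : List (Int × Int)) : Int × Int :=
  ds.foldl (fun a d => (a.1 + d.1, a.2 + d.2)) (0, 0)

theorem pvFoldl_add_shift (ds : List (Int × Int)) : ∀ (a : Int × Int),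
    ds.foldl (fun a d => (a.1 + d.1, a.2 + d.2)) a = (a.1 + (pvSum ds).1, a.2 + (pvSum ds).2) := by
  induction ds with
  | nil => intro a; simp [pvSum]
  | cons e es ih =>
    intro a
    have l : pvSum (e :: es) = ((0 : Int) + e.1 + (pvSum es).1, (0 : Int) + e.2 + (pvSum es).2) := by
      simp only [pvSum, List.foldl_cons]
      exact ih _
    rw [List.foldl_cons, ih, l, Prod.mk.injEq]
    constructor <;> ring

theorem pvSum_cons (d : Int × Int) (ds : List (Int × Int)) :
    pvSum (d :: ds) = (d.1 + (pvSum ds).1, d.2 + (pvSum ds).2) := by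
  simp only [pvSum, List.foldl_cons]
  rw [pvFoldl_add_shift ds ((0 : Int) + d.1, (0 : Int) + d.2), Prod.mk.injEq]
  constructor <;> · simp [pvSum]

theorem pvScan_append (ds1 : List (Int × Int)) : ∀ (ds2 : List (Int × Int)) (p : Int × Int),
    pvScan p (ds1 ++ ds2) = pvScan p ds1 ++ pvScan (p.1 + (pvSum ds1).1, p.2 + (pvSum ds1).2) ds2 := by
  induction ds1 with
  | nil => intro ds2 p; simp [pvScan, pvSum]
  | cons d ds ih =>
    intro ds2 p
    simp only [pvScan, List.cons_append, pvSum_cons]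
    rw [ih]
    have h1 : (p.1 + d.1 + (pvSum ds).1, p.2 + d.2 + (pvSum ds).2)
        = (p.1 + (d.1 + (pvSum ds).1), p.2 + (d.2 + (pvSum ds).2)) := by
      rw [Prod.mk.injEq]; constructor <;> ring
    rw [h1]

-- the sum of the deltas of a character list is given by character counts
theorem pvSum_counts (cs : List Char) :
    pvSum (cs.filterMap pvDelta)
      = ((cs.count 'S' : Int) - (cs.count 'N' : Int),
         (cs.count 'E' : Int) - (cs.count 'W' : Int)) := by
  induction cs with
  | nil => simp [pvSum]
  | cons c cs ih =>
    by_cases hS : c = 'S'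
    · subst hS
      rw [List.filterMap_cons_some (show pvDelta 'S' = some (1, 0) from rfl), pvSum_cons, ih]
      simp only [Prod.mk.injEq, List.count_cons]
      constructor <;> simp <;> omega
    · by_cases hN : c = 'N'
      · subst hN
        rw [List.filterMap_cons_some (show pvDelta 'N' = some (-1, 0) from rfl), pvSum_cons, ih]
        simp only [Prod.mk.injEq, List.count_cons]
        constructor <;> simp <;> omega
      · by_cases hW : c = 'W'
        · subst hW
          rw [List.filterMap_cons_some (show pvDelta 'W' = some (0, -1) from rfl), pvSum_cons, ih]
          simp only [Prod.mk.injEq, List.count_cons]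
          constructor <;> simp <;> omega
        · by_cases hE : c = 'E'
          · subst hE
            rw [List.filterMap_cons_some (show pvDelta 'E' = some (0, 1) from rfl), pvSum_cons, ih]
            simp only [Prod.mk.injEq, List.count_cons]
            constructor <;> simp <;> omega
          · rw [List.filterMap_cons_none (by simp [pvDelta, hS, hN, hW, hE]), ih]
            simp [hS, hN, hW, hE]

-- the divide-and-conquer trajectory equals the prefix-sum scan from the origin
theorem pvTraj_eq_scan (cs : List Char) :
    pvTraj cs = pvScan (0, 0) (cs.filterMap pvDelta) := by
  induction hn : cs.length using Nat.strong_induction_on generalizing cs with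
  | _ n ih =>
    by_cases h : cs.length ≤ 1
    · match cs, h with
      | [], _ => simp [pvTraj, pvScan]
      | [c], _ =>
        by_cases hS : c = 'S'
        · subst hS; simp [pvTraj, pvDelta, pvScan]
        · by_cases hN : c = 'N'
          · subst hN; simp [pvTraj, pvDelta, pvScan]
          · by_cases hW : c = 'W'
            · subst hW; simp [pvTraj, pvDelta, pvScan]
            · by_cases hE : c = 'E'
              · subst hE; simp [pvTraj, pvDelta, pvScan]
              · simp [pvTraj, pvDelta, hS, hN, hW, hE, pvScan]
    · rw [pvTraj]
      simp only [h, dite_false]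
      have hm1 : (cs.take (cs.length / 2)).length < cs.length := by
        simp only [List.length_take]; omega
      have hm2 : (cs.drop (cs.length / 2)).length < cs.length := by
        simp only [List.length_drop]; omega
      rw [ih _ (hn ▸ hm1) _ rfl, ih _ (hn ▸ hm2) _ rfl]
      have hsplit : cs.filterMap pvDelta
          = (cs.take (cs.length / 2)).filterMap pvDelta
            ++ (cs.drop (cs.length / 2)).filterMap pvDelta := by
        rw [← List.filterMap_append, List.take_append_drop]
      rw [hsplit, pvScan_append, pvSum_counts]
      congr 1
      have := pvScan_shift ((cs.drop (cs.length / 2)).filterMap pvDelta) (0, 0)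
        (((cs.take (cs.length / 2)).count 'S' : Int) - ((cs.take (cs.length / 2)).count 'N' : Int),
         ((cs.take (cs.length / 2)).count 'E' : Int) - ((cs.take (cs.length / 2)).count 'W' : Int))
      simpa using this.symm

-- ===== VERDICT (by name: the statement is the Claim_ definition above) =====
theorem create_solve_cor_spec : Claim_equal_create_solve_cor := by
  intro entry str _
  unfold Spec_create_solve_cor create_solve_cor create_solve_cor_alt
  rw [pvALoop_eq_scan, pvTraj_eq_scan]
  have := pvScan_shift (str.toList.filterMap pvDelta) (0, 0) (entry.2, entry.1)
  simpa using this
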